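-- pv_equiv track=rewrite | github.com/DavidRialFigols/adventOfCode | 2022/day-16.py | recursive
-- ===== SOURCE A (Python) =====
-- def recursive(data, distances, valve, min_left, pressure, solutions, visited_valves):
--     if tuple(visited_valves) in solutions:
--         solutions[tuple(visited_valves)] = max(pressure, solutions[tuple(visited_valves)])
--     else:
--         solutions[tuple(visited_valves)] = pressure
--     for next_valve in distances[valve]:
--         if next_valve in visited_valves: continue
--         next_min_left = min_left - distances[valve][next_valve] - 1
--         if next_min_left <= 0: continue
--         next_visited_valves = visited_valves+[next_valve]
--         next_visited_valves.sort()
--         recursive(data, distances, next_valve, next_min_left, pressure+data[next_valve]['rate']*next_min_left, solutions, visited_valves+[next_valve])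
--     return solutions
-- ===== SOURCE B (Python) =====
-- def recursive(data, distances, valve, min_left, pressure, solutions, visited_valves):
--     # B: iterative DFS with an explicit stack of frames instead of recursion.
--     # Children are pushed in reverse so pop() visits them in A's order; mutates
--     # `solutions` in place like A; the equivalence claim is about the return value.
--     stack = [(valve, min_left, pressure, visited_valves)]
--     while stack:
--         valve, min_left, pressure, visited = stack.pop()
--         key = tuple(visited)
--         if key in solutions:
--             solutions[key] = max(solutions[key], pressure)
--         else:
--             solutions[key] = pressure
--         row = distances[valve]
--         for next_valve in reversed(row):
--             if next_valve in visited: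
--                 continue
--             next_min_left = min_left - row[next_valve] - 1
--             if next_min_left > 0:
--                 stack.append((next_valve, next_min_left,
--                               pressure + data[next_valve]['rate'] * next_min_left,
--                               visited + [next_valve]))
--     return solutions
-- ===== Notes on version B (the rewrite author's own statement) =====
-- stated objective: alternative
-- what changed: B replaces A's recursion with an iterative worklist: an explicit stack of (valve, min_left, pressure, visited) frames popped in a while loop, children pushed in reverse so the pop order reproduces A's DFS preorder, and it drops A's dead sorted copy of the path.
import Mathlib
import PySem

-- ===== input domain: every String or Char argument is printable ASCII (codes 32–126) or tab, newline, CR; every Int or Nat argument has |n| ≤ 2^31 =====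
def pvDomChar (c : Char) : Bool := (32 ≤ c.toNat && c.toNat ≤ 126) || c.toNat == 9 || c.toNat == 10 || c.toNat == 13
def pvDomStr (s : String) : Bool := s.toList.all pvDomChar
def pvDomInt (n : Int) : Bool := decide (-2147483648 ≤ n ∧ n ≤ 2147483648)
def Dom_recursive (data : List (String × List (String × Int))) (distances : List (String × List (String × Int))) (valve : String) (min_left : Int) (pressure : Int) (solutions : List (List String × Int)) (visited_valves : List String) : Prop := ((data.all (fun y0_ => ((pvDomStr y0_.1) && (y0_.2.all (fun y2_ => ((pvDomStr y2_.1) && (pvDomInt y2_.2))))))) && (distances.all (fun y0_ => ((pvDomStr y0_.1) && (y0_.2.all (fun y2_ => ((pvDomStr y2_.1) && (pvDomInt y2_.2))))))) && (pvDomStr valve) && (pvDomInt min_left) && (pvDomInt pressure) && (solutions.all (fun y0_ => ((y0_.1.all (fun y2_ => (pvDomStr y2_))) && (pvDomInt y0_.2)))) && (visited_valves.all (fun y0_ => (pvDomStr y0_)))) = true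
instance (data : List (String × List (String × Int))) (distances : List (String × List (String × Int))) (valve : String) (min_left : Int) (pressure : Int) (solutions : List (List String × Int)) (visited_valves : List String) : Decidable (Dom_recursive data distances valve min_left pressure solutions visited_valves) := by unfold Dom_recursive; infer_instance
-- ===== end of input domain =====

-- B replaces A's recursion with an iterative worklist: an explicit stack of frames popped
-- in a while loop (children pushed so that the pop order is A's DFS preorder), dropping A's
-- dead sorted copy of the path.  Both Pythons mutate `solutions` in place identically; the
-- claim is about the returned value.  Objective: alternative decomposition, same cost.

-- ===== PORT A =====
-- row of a dict-of-dicts: distances[valve] (first-match lookup; [] only outside Pre_)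
def pvRow (distances : List (String × List (String × Int))) (valve : String) : List (String × Int) :=
  (PySem.Dict.mk distances).getD valve []

-- data[next_valve]['rate'] (0 only outside Pre_)
def pvRate (data : List (String × List (String × Int))) (k : String) : Int :=
  (PySem.Dict.mk ((PySem.Dict.mk data).getD k [])).getD "rate" 0

-- the recursion of A, total via fuel (fuel exhaustion is unreachable at the fuel `recursive` supplies)
def recA (data distances : List (String × List (String × Int))) : Nat → String → Int → Int →
    PySem.Dict (List String) Int → List String → PySem.Dict (List String) Int
  | 0, _, _, _, sols, _ => sols
  | Nat.succ f, valve, min_left, pressure, sols, visited =>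
    let sols1 := if sols.contains visited then
        sols.insert visited (max pressure (sols.getD visited 0))
      else sols.insert visited pressure
    ((pvRow distances valve).map (·.1)).foldl (fun s k =>
      if k ∈ visited then s
      else
        let nml := min_left - (PySem.Dict.mk (pvRow distances valve)).getD k 0 - 1
        if nml ≤ 0 then s
        else recA data distances f k nml (pressure + pvRate data k * nml) s (visited ++ [k])) sols1

def recursive (data : List (String × List (String × Int))) (distances : List (String × List (String × Int))) (valve : String) (min_left : Int) (pressure : Int) (solutions : List (List String × Int)) (visited_valves : List String) : List (List String × Int) :=
  (recA data distances ((distances.flatMap (fun q => q.2)).length + 1)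
    valve min_left pressure (PySem.Dict.mk solutions) visited_valves).items

-- ===== PORT B =====
-- a stack frame of Source B's while loop, together with its totality fuel (first component):
-- (fuel, valve, min_left, pressure, visited)
def pvChild (data distances : List (String × List (String × Int))) (f : Nat) (valve : String)
    (ml p : Int) (visited : List String) (k : String) :
    Option (Nat × String × Int × Int × List String) :=
  if k ∈ visited then none
  else
    let nml := ml - (PySem.Dict.mk (pvRow distances valve)).getD k 0 - 1
    if nml ≤ 0 then none
    else some (f, k, nml, p + pvRate data k * nml, visited ++ [k])

-- bound on any row length, used only by loopB's termination measure
def pvL (distances : List (String × List (String × Int))) : Nat :=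
  (distances.flatMap (fun q => q.2)).length

lemma pvRow_len_le (distances : List (String × List (String × Int))) (valve : String) :
    (pvRow distances valve).length ≤ pvL distances := by
  unfold pvRow pvL
  induction distances with
  | nil => simp [PySem.Dict.getD, PySem.Dict.get?]
  | cons q rest ih =>
    obtain ⟨k, v⟩ := q
    rw [List.flatMap_cons, List.length_append]
    cases hkv : (k == valve) with
    | true =>
      simp only [PySem.Dict.getD, PySem.Dict.get?_mk_cons, hkv, if_true, Option.getD_some]
      omega
    | false =>
      simp only [PySem.Dict.getD, PySem.Dict.get?_mk_cons, hkv] at ih ⊢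
      exact le_trans ih (Nat.le_add_left _ _)

lemma pvChild_fuel (data distances : List (String × List (String × Int))) (f : Nat)
    (valve : String) (ml p : Int) (visited : List String) (k : String)
    (fr : Nat × String × Int × Int × List String)
    (h : pvChild data distances f valve ml p visited k = some fr) : fr.1 = f := by
  by_cases h1 : k ∈ visited
  · simp [pvChild, h1] at h
  · by_cases h2 : ml - (PySem.Dict.mk (pvRow distances valve)).getD k 0 - 1 ≤ 0
    · simp [pvChild, h1, h2] at h
    · simp only [pvChild, h1, h2, if_false, Option.some.injEq] at h
      rw [← h]

lemma pvSum_pow_children (l : List (Nat × String × Int × Int × List String)) (c f : Nat)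
    (h : ∀ x ∈ l, x.1 = f) : (l.map (fun fr => c ^ fr.1)).sum = l.length * c ^ f := by
  induction l with
  | nil => simp
  | cons x l ih =>
    simp only [List.map_cons, List.sum_cons, List.length_cons]
    rw [h x (by simp), ih (fun y hy => h y (by simp [hy]))]
    ring

-- Source B's while loop: pop the top frame, merge its (path, pressure) into the dict, push its
-- viable children (Lean stack = list with top at head; Source B appends the children reversed and
-- pops from the end, which visits them in the same order)
def loopB (data distances : List (String × List (String × Int))) :
    List (Nat × String × Int × Int × List String) → PySem.Dict (List String) Int →
    PySem.Dict (List String) Int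
  | [], s => s
  | (0, _, _, _, _) :: rest, s => loopB data distances rest s   -- fuel exhausted: unreachable at supplied fuel
  | (Nat.succ f, valve, ml, p, visited) :: rest, s =>
    let s1 := if s.contains visited then s.insert visited (max (s.getD visited 0) p)
      else s.insert visited p
    let children := ((pvRow distances valve).map (·.1)).filterMap
      (pvChild data distances f valve ml p visited)
    loopB data distances (children ++ rest) s1
termination_by stack _ => (stack.map (fun fr => (pvL distances + 1) ^ fr.1)).sum
decreasing_by
  · simp only [List.map_cons, List.sum_cons, pow_zero]; omega
  · simp only [List.map_append, List.sum_append, List.map_cons, List.sum_cons]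
    have hf : ∀ x ∈ ((pvRow distances valve).map (·.1)).filterMap
        (pvChild data distances f valve ml p visited), x.1 = f := by
      intro x hx
      rcases List.mem_filterMap.mp hx with ⟨k, _, hk⟩
      exact pvChild_fuel data distances f valve ml p visited k x hk
    rw [pvSum_pow_children _ _ f hf]
    have hlen : (((pvRow distances valve).map (·.1)).filterMap
        (pvChild data distances f valve ml p visited)).length ≤ pvL distances := by
      calc _ ≤ ((pvRow distances valve).map (·.1)).length := List.length_filterMap_le _ _
        _ = (pvRow distances valve).length := List.length_map ..
        _ ≤ pvL distances := pvRow_len_le distances valve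
    have hpos : 0 < (pvL distances + 1) ^ f := Nat.pow_pos (by omega)
    have key : (((pvRow distances valve).map (·.1)).filterMap
        (pvChild data distances f valve ml p visited)).length * (pvL distances + 1) ^ f
        < (pvL distances + 1) ^ (f + 1) := by
      rw [pow_succ]
      nlinarith [hpos, hlen]
    simp only [Nat.succ_eq_add_one]
    omega

def recursive_alt (data : List (String × List (String × Int))) (distances : List (String × List (String × Int))) (valve : String) (min_left : Int) (pressure : Int) (solutions : List (List String × Int)) (visited_valves : List String) : List (List String × Int) :=
  (loopB data distances
    [((distances.flatMap (fun q => q.2)).length + 1, valve, min_left, pressure, visited_valves)]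
    (PySem.Dict.mk solutions)).items

-- ===== PRECONDITION & SPEC =====
-- Pre_ excludes the inputs on which A raises KeyError: `valve` must be a key of `distances`, and,
-- unless no neighbour of `valve` can be entered at all (every key of its row is already visited or
-- has no time budget left, in which case no other lookup happens), every key named in any row of
-- `distances` must itself be a key of `distances` and a key of `data` whose dict carries a 'rate'
-- entry.  The closure clause is a closed-form over-approximation: it also excludes some inputs where
-- a dangling key sits two or more steps away and is never reached because the budget runs out first
-- (A still returns there; see cites).
def Pre_recursive (data : List (String × List (String × Int))) (distances : List (String × List (String × Int))) (valve : String) (min_left : Int) (pressure : Int) (solutions : List (List String × Int)) (visited_valves : List String) : Prop :=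
  ((distances.map (·.1)).contains valve &&
    (((PySem.Dict.mk distances).getD valve []).all (fun e =>
        visited_valves.contains e.1 || decide (min_left - e.2 - 1 ≤ 0)) ||
      distances.all (fun q => q.2.all (fun e =>
        (distances.map (·.1)).contains e.1 &&
        ((PySem.Dict.mk data).get? e.1).isSome &&
        (((PySem.Dict.mk data).getD e.1 []).map (·.1)).contains "rate")))) = true
instance (data : List (String × List (String × Int))) (distances : List (String × List (String × Int))) (valve : String) (min_left : Int) (pressure : Int) (solutions : List (List String × Int)) (visited_valves : List String) : Decidable (Pre_recursive data distances valve min_left pressure solutions visited_valves) := by unfold Pre_recursive; infer_instance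

def pvWitness_recursive : (List (String × List (String × Int))) × (List (String × List (String × Int))) × String × Int × Int × (List (List String × Int)) × List String :=
  ([("a", [("rate", 2)]), ("b", [("rate", 3)])],
   [("a", [("b", 1)]), ("b", [("a", 1)])],
   "a", 5, 0, [], [])

def Spec_recursive (data : List (String × List (String × Int))) (distances : List (String × List (String × Int))) (valve : String) (min_left : Int) (pressure : Int) (solutions : List (List String × Int)) (visited_valves : List String) (out : List (List String × Int)) : Prop := out = recursive_alt data distances valve min_left pressure solutions visited_valves
instance (data : List (String × List (String × Int))) (distances : List (String × List (String × Int))) (valve : String) (min_left : Int) (pressure : Int) (solutions : List (List String × Int)) (visited_valves : List String) (out : List (List String × Int)) : Decidable (Spec_recursive data distances valve min_left pressure solutions visited_valves out) := by unfold Spec_recursive; infer_instance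

-- ===== CLAIM (what is proved, stated in full; the proofs are below) =====
def Claim_equal_recursive : Prop := ∀ (data : List (String × List (String × Int))) (distances : List (String × List (String × Int))) (valve : String) (min_left : Int) (pressure : Int) (solutions : List (List String × Int)) (visited_valves : List String), Dom_recursive data distances valve min_left pressure solutions visited_valves → Pre_recursive data distances valve min_left pressure solutions visited_valves → Spec_recursive data distances valve min_left pressure solutions visited_valves (recursive data distances valve min_left pressure solutions visited_valves)

-- ===== LEMMAS AND PROOFS =====

-- proof-only name for A's inline loop body
def stepA (data distances : List (String × List (String × Int))) (f : Nat) (valve : String)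
    (min_left pressure : Int) (visited : List String)
    (s : PySem.Dict (List String) Int) (k : String) : PySem.Dict (List String) Int :=
  if k ∈ visited then s
  else
    let nml := min_left - (PySem.Dict.mk (pvRow distances valve)).getD k 0 - 1
    if nml ≤ 0 then s
    else recA data distances f k nml (pressure + pvRate data k * nml) s (visited ++ [k])

lemma recA_succ (data distances : List (String × List (String × Int))) (f : Nat) (valve : String)
    (ml p : Int) (sols : PySem.Dict (List String) Int) (visited : List String) :
    recA data distances (f + 1) valve ml p sols visited =
      ((pvRow distances valve).map (·.1)).foldl (stepA data distances f valve ml p visited)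
        (if sols.contains visited then sols.insert visited (max p (sols.getD visited 0))
         else sols.insert visited p) := rfl

lemma loopB_nil (data distances : List (String × List (String × Int)))
    (s : PySem.Dict (List String) Int) : loopB data distances [] s = s := by
  rw [loopB]

lemma loopB_zero (data distances : List (String × List (String × Int)))
    (valve : String) (ml p : Int) (visited : List String)
    (rest : List (Nat × String × Int × Int × List String))
    (s : PySem.Dict (List String) Int) :
    loopB data distances ((0, valve, ml, p, visited) :: rest) s =
      loopB data distances rest s := by
  rw [loopB]

lemma loopB_succ (data distances : List (String × List (String × Int))) (f : Nat)
    (valve : String) (ml p : Int) (visited : List String)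
    (rest : List (Nat × String × Int × Int × List String))
    (s : PySem.Dict (List String) Int) :
    loopB data distances ((f + 1, valve, ml, p, visited) :: rest) s =
      loopB data distances
        (((pvRow distances valve).map (·.1)).filterMap
            (pvChild data distances f valve ml p visited) ++ rest)
        (if s.contains visited then s.insert visited (max (s.getD visited 0) p)
         else s.insert visited p) := by
  rw [loopB]

-- A's inline dict update is B's merge step (max arguments swapped)
lemma update_comm (s : PySem.Dict (List String) Int) (visited : List String) (p : Int) :
    (if s.contains visited then s.insert visited (max (s.getD visited 0) p)
      else s.insert visited p) =
    (if s.contains visited then s.insert visited (max p (s.getD visited 0))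
      else s.insert visited p) := by
  rw [max_comm]

-- the key-loop bridge: popping the children pushed for keys ks equals folding A's step over ks
lemma loopB_children (data distances : List (String × List (String × Int))) (f : Nat)
    (ih : ∀ (valve : String) (ml p : Int) (visited : List String)
      (rest : List (Nat × String × Int × Int × List String)) (s : PySem.Dict (List String) Int),
      loopB data distances ((f, valve, ml, p, visited) :: rest) s =
        loopB data distances rest (recA data distances f valve ml p s visited))
    (valve : String) (ml p : Int) (visited : List String) :
    ∀ (ks : List String) (rest : List (Nat × String × Int × Int × List String))
      (s : PySem.Dict (List String) Int),
      loopB data distances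
          (ks.filterMap (pvChild data distances f valve ml p visited) ++ rest) s =
        loopB data distances rest
          (ks.foldl (stepA data distances f valve ml p visited) s) := by
  intro ks
  induction ks with
  | nil => intro rest s; simp
  | cons k ks ihk =>
    intro rest s
    rw [List.filterMap_cons, List.foldl_cons]
    by_cases hk : k ∈ visited
    · have hc : pvChild data distances f valve ml p visited k = none := by simp [pvChild, hk]
      have hs : stepA data distances f valve ml p visited s k = s := by simp [stepA, hk]
      simp only [hc, hs]
      exact ihk rest s
    · by_cases hn : ml - (PySem.Dict.mk (pvRow distances valve)).getD k 0 - 1 ≤ 0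
      · have hc : pvChild data distances f valve ml p visited k = none := by
          simp [pvChild, hk, hn]
        have hs : stepA data distances f valve ml p visited s k = s := by
          simp [stepA, hk, hn]
        simp only [hc, hs]
        exact ihk rest s
      · have hc : pvChild data distances f valve ml p visited k =
            some (f, k, ml - (PySem.Dict.mk (pvRow distances valve)).getD k 0 - 1,
              p + pvRate data k * (ml - (PySem.Dict.mk (pvRow distances valve)).getD k 0 - 1),
              visited ++ [k]) := by
          simp [pvChild, hk, hn]
        have hs : stepA data distances f valve ml p visited s k =
            recA data distances f k (ml - (PySem.Dict.mk (pvRow distances valve)).getD k 0 - 1)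
              (p + pvRate data k * (ml - (PySem.Dict.mk (pvRow distances valve)).getD k 0 - 1))
              s (visited ++ [k]) := by
          simp [stepA, hk, hn]
        simp only [hc, hs, List.cons_append]
        rw [ih, ihk]

-- main invariant: one frame on the stack does exactly what A's recursive call does
lemma loopB_frame (data distances : List (String × List (String × Int))) :
    ∀ (f : Nat) (valve : String) (ml p : Int) (visited : List String)
      (rest : List (Nat × String × Int × Int × List String)) (s : PySem.Dict (List String) Int),
      loopB data distances ((f, valve, ml, p, visited) :: rest) s =
        loopB data distances rest (recA data distances f valve ml p s visited) := by
  intro f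
  induction f with
  | zero => intro valve ml p visited rest s; rw [loopB_zero]; rfl
  | succ f ih =>
    intro valve ml p visited rest s
    rw [loopB_succ, recA_succ, update_comm,
      loopB_children data distances f ih valve ml p visited]

-- ===== VERDICT (by name: the statement is the Claim_ definition above) =====
theorem recursive_spec : Claim_equal_recursive := by
  intro data distances valve min_left pressure solutions visited_valves _ _
  unfold Spec_recursive recursive recursive_alt
  rw [loopB_frame, loopB_nil]
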